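-- pv_equiv track=rewrite | github.com/gn00295120/pcap-hunter | app/threat_intel/attack_mapping.py | _determine_kill_chain_phase
-- ===== SOURCE A (Python) =====
-- KILL_CHAIN_ORDER = [
--     "reconnaissance",
--     "resource-development",
--     "initial-access",
--     "execution",
--     "persistence",
--     "privilege-escalation",
--     "defense-evasion",
--     "credential-access",
--     "discovery",
--     "lateral-movement",
--     "collection",
--     "command-and-control",
--     "exfiltration",
--     "impact",
-- ]
--
-- def _determine_kill_chain_phase(tactics_summary: dict[str, int]) -> str:
--     """Determine the most advanced kill chain phase detected."""
--     if not tactics_summary: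
--         return "unknown"
--
--     # Find the most advanced phase
--     max_index = -1
--     advanced_phase = "unknown"
--
--     for tactic in tactics_summary.keys():
--         if tactic in KILL_CHAIN_ORDER:
--             index = KILL_CHAIN_ORDER.index(tactic)
--             if index > max_index:
--                 max_index = index
--                 advanced_phase = tactic
--
--     return advanced_phase
-- ===== SOURCE B (Python) =====
-- KILL_CHAIN_ORDER = [
--     "reconnaissance",
--     "resource-development",
--     "initial-access",
--     "execution",
--     "persistence",
--     "privilege-escalation",
--     "defense-evasion",
--     "credential-access",
--     "discovery",
--     "lateral-movement",
--     "collection",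
--     "command-and-control",
--     "exfiltration",
--     "impact",
-- ]
--
-- def _determine_kill_chain_phase(tactics_summary: dict[str, int]) -> str:
--     """Determine the most advanced kill chain phase detected."""
--     for phase in reversed(KILL_CHAIN_ORDER):
--         if phase in tactics_summary:
--             return phase
--     return "unknown"
-- ===== Notes on version B (the rewrite author's own statement) =====
-- stated objective: simpler
-- what changed: Instead of scanning all dict keys while tracking a max kill-chain index and its phase, B walks KILL_CHAIN_ORDER from the most advanced phase backwards and returns the first phase present in the dict, with no accumulator and an early return.
import Mathlib
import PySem

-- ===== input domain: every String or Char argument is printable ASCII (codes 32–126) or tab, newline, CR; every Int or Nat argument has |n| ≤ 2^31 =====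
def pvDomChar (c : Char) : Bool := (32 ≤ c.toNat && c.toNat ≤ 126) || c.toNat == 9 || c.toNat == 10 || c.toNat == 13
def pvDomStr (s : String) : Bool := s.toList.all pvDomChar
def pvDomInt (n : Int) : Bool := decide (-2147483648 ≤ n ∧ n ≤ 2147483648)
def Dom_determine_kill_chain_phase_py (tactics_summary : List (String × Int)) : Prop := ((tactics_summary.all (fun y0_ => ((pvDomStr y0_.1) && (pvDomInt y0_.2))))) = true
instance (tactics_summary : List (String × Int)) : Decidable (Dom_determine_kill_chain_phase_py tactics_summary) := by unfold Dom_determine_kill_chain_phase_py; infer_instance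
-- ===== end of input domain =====

-- B replaces A's max-index accumulator scan over the dict keys by a short-circuiting
-- walk of KILL_CHAIN_ORDER from the most advanced phase backwards (objective: simpler).

def pvORD : List String :=
  ["reconnaissance", "resource-development", "initial-access", "execution",
   "persistence", "privilege-escalation", "defense-evasion", "credential-access",
   "discovery", "lateral-movement", "collection", "command-and-control",
   "exfiltration", "impact"]

-- ===== PORT A =====
def determine_kill_chain_phase_py (tactics_summary : List (String × Int)) : String :=
  if tactics_summary = [] then "unknown"
  else
    let st := tactics_summary.foldl (fun (st : Int × String) kv =>
      if pvORD.contains kv.1 then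
        let index : Int := (((PySem.List.index? pvORD kv.1).getD 0 : Nat) : Int)
        if st.1 < index then (index, kv.1) else st
      else st) (-1, "unknown")
    st.2

-- ===== PORT B =====
def pvScan (tactics_summary : List (String × Int)) : List String → String
  | [] => "unknown"
  | p :: rest => if tactics_summary.any (fun kv => kv.1 == p) then p else pvScan tactics_summary rest

def determine_kill_chain_phase_py_alt (tactics_summary : List (String × Int)) : String :=
  pvScan tactics_summary pvORD.reverse

-- ===== PRECONDITION & SPEC =====
def Spec_determine_kill_chain_phase_py (tactics_summary : List (String × Int)) (out : String) : Prop := out = determine_kill_chain_phase_py_alt tactics_summary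
instance (tactics_summary : List (String × Int)) (out : String) : Decidable (Spec_determine_kill_chain_phase_py tactics_summary out) := by unfold Spec_determine_kill_chain_phase_py; infer_instance

-- ===== CLAIM (what is proved, stated in full; the proofs are below) =====
def Claim_equal_determine_kill_chain_phase_py : Prop := ∀ (tactics_summary : List (String × Int)), Dom_determine_kill_chain_phase_py tactics_summary → Spec_determine_kill_chain_phase_py tactics_summary (determine_kill_chain_phase_py tactics_summary)

-- ===== LEMMAS AND PROOFS =====

-- index of a phase in pvORD (0 if absent; only used under a membership guard)
def pvIdx (p : String) : Int := (((PySem.List.index? pvORD p).getD 0 : Nat) : Int)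

-- index of a phase, -1 if not a phase
def pvIdxv (p : String) : Int := if pvORD.contains p then pvIdx p else -1

-- phase name of an index, "unknown" for -1
def pvPhase (m : Int) : String := if m < 0 then "unknown" else pvORD.getD m.toNat "unknown"

-- maximum pvIdxv over the keys
def pvRank : List (String × Int) → Int
  | [] => -1
  | kv :: rest => max (pvIdxv kv.1) (pvRank rest)

lemma pvORD_facts : ∀ j, j < 14 → pvIdxv (pvORD.getD j "") = (j : Int) ∧ pvPhase (j : Int) = pvORD.getD j "" := by decide

lemma pvPhase_idx {p : String} (h : pvORD.contains p = true) : pvPhase (pvIdx p) = p := by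
  have hm : p ∈ pvORD := by simpa using h
  fin_cases hm <;> decide

lemma pvIdxv_lt (p : String) : pvIdxv p < 14 := by
  unfold pvIdxv
  split
  · rename_i h
    have hm : p ∈ pvORD := by simpa using h
    fin_cases hm <;> decide
  · decide

lemma pvRank_lb (ts : List (String × Int)) : -1 ≤ pvRank ts := by
  induction ts with
  | nil => simp [pvRank]
  | cons kv rest ih => simp only [pvRank]; exact le_trans ih (le_max_right _ _)

lemma pvRank_lt (ts : List (String × Int)) : pvRank ts < 14 := by
  induction ts with
  | nil => simp [pvRank]
  | cons kv rest ih =>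
    simp only [pvRank, max_lt_iff]
    exact ⟨pvIdxv_lt _, ih⟩

lemma pvFold_eq (ts : List (String × Int)) : ∀ m : Int, -1 ≤ m →
    ts.foldl (fun (st : Int × String) kv =>
      if pvORD.contains kv.1 then
        let index : Int := (((PySem.List.index? pvORD kv.1).getD 0 : Nat) : Int)
        if st.1 < index then (index, kv.1) else st
      else st) (m, pvPhase m)
    = (max m (pvRank ts), pvPhase (max m (pvRank ts))) := by
  induction ts with
  | nil => intro m hm; simp [pvRank, max_eq_left hm]
  | cons kv rest ih =>
    intro m hm
    have hstep : (if pvORD.contains kv.1 = true then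
        let index : Int := (((PySem.List.index? pvORD kv.1).getD 0 : Nat) : Int)
        if (m, pvPhase m).1 < index then (index, kv.1) else (m, pvPhase m)
      else (m, pvPhase m))
        = (max m (pvIdxv kv.1), pvPhase (max m (pvIdxv kv.1))) := by
      by_cases hc : pvORD.contains kv.1 = true
      · rw [if_pos hc]
        show (if m < pvIdx kv.1 then (pvIdx kv.1, kv.1) else (m, pvPhase m)) = _
        by_cases hlt : m < pvIdx kv.1
        · have hmx : max m (pvIdxv kv.1) = pvIdx kv.1 := by
            unfold pvIdxv; rw [if_pos hc]; omega
          rw [if_pos hlt, hmx, pvPhase_idx hc]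
        · have hmx : max m (pvIdxv kv.1) = m := by
            unfold pvIdxv; rw [if_pos hc]; omega
          rw [if_neg hlt, hmx]
      · have hv : pvIdxv kv.1 = -1 := by unfold pvIdxv; rw [if_neg hc]
        have hmx : max m (pvIdxv kv.1) = m := by rw [hv]; omega
        rw [if_neg hc, hmx]
    rw [List.foldl_cons, hstep, ih _ (le_trans hm (le_max_left _ _))]
    have hassoc : max (max m (pvIdxv kv.1)) (pvRank rest) = max m (pvRank (kv :: rest)) := by
      simp only [pvRank]; rw [max_assoc]
    rw [hassoc]

lemma A_eq_phase_rank (ts : List (String × Int)) :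
    determine_kill_chain_phase_py ts = pvPhase (pvRank ts) := by
  unfold determine_kill_chain_phase_py
  by_cases h : ts = []
  · subst h; simp [pvRank, pvPhase]
  · rw [if_neg h]
    have h0 : pvPhase (-1) = "unknown" := by decide
    show (ts.foldl _ (-1, "unknown")).2 = _
    rw [← h0, pvFold_eq ts (-1) (le_refl _),
        max_eq_right (pvRank_lb ts)]

lemma pvRank_present (ts : List (String × Int)) (h : 0 ≤ pvRank ts) :
    ts.any (fun kv => kv.1 == pvPhase (pvRank ts)) = true := by
  induction ts with
  | nil => simp [pvRank] at h
  | cons kv rest ih =>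
    simp only [pvRank] at h ⊢
    rcases le_total (pvRank rest) (pvIdxv kv.1) with hle | hle
    · rw [max_eq_left hle]
      have hc : pvORD.contains kv.1 = true := by
        by_contra hc
        have : pvIdxv kv.1 = -1 := by
          unfold pvIdxv; rw [if_neg (by simpa using hc)]
        omega
      have hv : pvIdxv kv.1 = pvIdx kv.1 := by unfold pvIdxv; rw [if_pos hc]
      rw [hv, pvPhase_idx hc]
      simp
    · rw [max_eq_right hle]
      have := ih (by omega)
      simp [this]

lemma pvRank_ub (ts : List (String × Int)) (q : String)
    (h : ts.any (fun kv => kv.1 == q) = true) : pvIdxv q ≤ pvRank ts := by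
  induction ts with
  | nil => simp at h
  | cons kv rest ih =>
    simp only [List.any_cons, Bool.or_eq_true, beq_iff_eq] at h
    simp only [pvRank]
    rcases h with h | h
    · rw [← h]; exact le_max_left _ _
    · exact le_trans (ih h) (le_max_right _ _)

lemma pvScan_take (ts : List (String × Int)) :
    ∀ j : Nat, j ≤ 14 → pvRank ts < (j : Int) →
    pvScan ts (pvORD.take j).reverse = pvPhase (pvRank ts) := by
  intro j
  induction j with
  | zero =>
    intro _ hr
    have := pvRank_lb ts
    have hr1 : pvRank ts = -1 := by omega
    simp [pvScan, hr1, pvPhase]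
  | succ j ih =>
    intro hj hr
    have hj' : j < 14 := by omega
    have hlen : j < pvORD.length := by simp [pvORD]; omega
    have hget : pvORD[j]? = some (pvORD.getD j "") := by
      rw [List.getD_eq_getElem?_getD, List.getElem?_eq_getElem hlen]; simp
    have htake : (pvORD.take (j+1)).reverse = pvORD.getD j "" :: (pvORD.take j).reverse := by
      rw [List.take_add_one, List.reverse_append, hget]
      simp
    rw [htake]
    obtain ⟨hidx, hph⟩ := pvORD_facts j hj'
    by_cases hp : ts.any (fun kv => kv.1 == pvORD.getD j "") = true
    · have hub := pvRank_ub ts _ hp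
      rw [hidx] at hub
      have hrj : pvRank ts = (j : Int) := by push_cast at hr; omega
      simp only [pvScan, hp, if_true]
      rw [hrj, hph]
    · have hne : pvRank ts ≠ (j : Int) := by
        intro he
        apply hp
        have hpr := pvRank_present ts (by omega)
        rw [he, hph] at hpr
        exact hpr
      have hr' : pvRank ts < (j : Int) := by push_cast at hr; omega
      simp only [pvScan, hp, if_false, Bool.false_eq_true]
      exact ih (by omega) hr'

-- ===== VERDICT (by name: the statement is the Claim_ definition above) =====
theorem determine_kill_chain_phase_py_spec : Claim_equal_determine_kill_chain_phase_py := by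
  intro ts _
  show determine_kill_chain_phase_py ts = determine_kill_chain_phase_py_alt ts
  rw [A_eq_phase_rank]
  have h := pvScan_take ts 14 (le_refl _) (by exact_mod_cast pvRank_lt ts)
  rw [show pvORD.take 14 = pvORD from rfl] at h
  unfold determine_kill_chain_phase_py_alt
  exact h.symm
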